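-- pv_equiv track=rewrite | github.com/Kui2ei/FTI | newopenfhe.py | select_layers
-- ===== SOURCE A (Python) =====
-- import math
-- from typing import Iterable, List, Optional, Sequence, Tuple
--
-- def select_layers(log_slots: int, budget: int) -> Tuple[int, int, int]:
--     """Python mirror of SelectLayers(logSlots, budget) in ckksrns-utils.cpp."""
--     if log_slots <= 0:
--         raise ValueError("log_slots must be positive")
--     if budget <= 0:
--         raise ValueError("budget must be positive")
--
--     layers = int(math.ceil(float(log_slots) / budget))
--     rows = log_slots // layers
--     rem = log_slots % layers
--     dim = rows + (1 if rem != 0 else 0)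
--
--     # The above choice ensures dim <= budget.
--     if dim < budget:
--         layers -= 1
--         rows = log_slots // layers
--         rem = log_slots - rows * layers
--         dim = rows + (1 if rem != 0 else 0)
--
--         # The above choice ensures dim >= budget.
--         if dim > budget:
--             while dim != budget:
--                 rows -= 1
--                 rem = log_slots - rows * layers
--                 dim = rows + (1 if rem != 0 else 0)
--
--     return layers, rows, rem
-- ===== SOURCE B (Python) =====
-- from typing import Tuple
--
--
-- def select_layers(log_slots: int, budget: int) -> Tuple[int, int, int]:
--     """SelectLayers(logSlots, budget): closed form instead of the corrective while-loop."""
--     if log_slots <= 0: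
--         raise ValueError("log_slots must be positive")
--     if budget <= 0:
--         raise ValueError("budget must be positive")
--
--     layers = -(-log_slots // budget)          # ceil(log_slots / budget)
--     rows, rem = divmod(log_slots, layers)
--     if rows + (1 if rem else 0) >= budget:
--         return layers, rows, rem
--
--     # dim < budget: drop one layer; the corrected split is known in closed form.
--     layers -= 1
--     if log_slots == budget * layers:
--         return layers, budget, 0
--     return layers, budget - 1, log_slots - (budget - 1) * layers
-- ===== Notes on version B (the rewrite author's own statement) =====
-- stated objective: simpler
-- what changed: The re-divide-then-decrementing while-loop (and the float-based ceil) is replaced by integer ceiling division and a closed-form choice of (rows, rem) in the dim<budget branch, proved to be exactly where the loop lands.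
import Mathlib
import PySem

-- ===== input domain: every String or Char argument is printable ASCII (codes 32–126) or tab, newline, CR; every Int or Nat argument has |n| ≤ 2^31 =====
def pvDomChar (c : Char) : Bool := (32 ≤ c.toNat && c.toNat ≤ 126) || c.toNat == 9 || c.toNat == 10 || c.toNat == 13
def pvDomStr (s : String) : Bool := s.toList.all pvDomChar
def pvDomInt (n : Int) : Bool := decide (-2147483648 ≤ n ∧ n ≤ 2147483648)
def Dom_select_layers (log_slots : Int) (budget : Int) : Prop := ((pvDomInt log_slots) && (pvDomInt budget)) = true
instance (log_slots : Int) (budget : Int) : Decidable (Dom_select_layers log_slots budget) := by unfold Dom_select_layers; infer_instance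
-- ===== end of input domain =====

-- B replaces A's corrective while-loop (and float ceil) by integer ceiling division and a
-- closed form for the dim<budget branch; objective: simpler (O(1) branch instead of a loop).


-- ===== PORT A =====
-- the 'while dim != budget' loop; fuel bounds the iterations (enough fuel is supplied at the
-- call site; under Pre_ the loop provably exits before the fuel runs out)
def slWhile (ls l b : Int) : Nat → Int → Int → Int → Int × Int
  | 0, rows, rem, _ => (rows, rem)
  | f + 1, rows, rem, dim =>
    if dim ≠ b then
      let rows' := rows - 1
      let rem' := ls - rows' * l
      let dim' := rows' + (if rem' ≠ 0 then (1 : Int) else 0)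
      slWhile ls l b f rows' rem' dim'
    else (rows, rem)

-- A raises ValueError when log_slots ≤ 0 or budget ≤ 0, and ZeroDivisionError when
-- 0 < log_slots < budget (layers-1 = 0); those inputs are excluded by Pre_select_layers.
def select_layers (log_slots : Int) (budget : Int) : Int × Int × Int :=
  -- int(math.ceil(float(log_slots)/budget)): exact integer ceiling division on the domain
  -- (|n| ≤ 2^31 < 2^53, so the float quotient never rounds across an integer)
  let layers := -(PySem.Int.floordiv (-log_slots) budget)
  let rows := PySem.Int.floordiv log_slots layers
  let rem := PySem.Int.mod log_slots layers
  let dim := rows + (if rem ≠ 0 then (1 : Int) else 0)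
  if dim < budget then
    let layers := layers - 1
    let rows := PySem.Int.floordiv log_slots layers
    let rem := log_slots - rows * layers
    let dim := rows + (if rem ≠ 0 then (1 : Int) else 0)
    if dim > budget then
      let p := slWhile log_slots layers budget (rows.toNat + 1) rows rem dim
      (layers, p.1, p.2)
    else (layers, rows, rem)
  else (layers, rows, rem)

-- ===== PORT B =====
def select_layers_alt (log_slots : Int) (budget : Int) : Int × Int × Int :=
  let layers := -(PySem.Int.floordiv (-log_slots) budget)
  let rows := PySem.Int.floordiv log_slots layers
  let rem := PySem.Int.mod log_slots layers
  if rows + (if rem ≠ 0 then (1 : Int) else 0) ≥ budget then (layers, rows, rem)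
  else
    let layers := layers - 1
    if log_slots = budget * layers then (layers, budget, 0)
    else (layers, budget - 1, log_slots - (budget - 1) * layers)

-- ===== PRECONDITION & SPEC =====
-- exactly the inputs on which A returns: it raises ValueError unless both are positive, and
-- ZeroDivisionError when 0 < log_slots < budget (layers becomes 0 in the dim<budget branch)
def Pre_select_layers (log_slots : Int) (budget : Int) : Prop :=
  0 < budget ∧ budget ≤ log_slots
instance (log_slots : Int) (budget : Int) : Decidable (Pre_select_layers log_slots budget) := by unfold Pre_select_layers; infer_instance

def pvWitness_select_layers : Int × Int := (10, 3)

def Spec_select_layers (log_slots : Int) (budget : Int) (out : Int × Int × Int) : Prop := out = select_layers_alt log_slots budget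
instance (log_slots : Int) (budget : Int) (out : Int × Int × Int) : Decidable (Spec_select_layers log_slots budget out) := by unfold Spec_select_layers; infer_instance

-- ===== CLAIM (what is proved, stated in full; the proofs are below) =====
def Claim_equal_select_layers : Prop := ∀ (log_slots : Int) (budget : Int), Dom_select_layers log_slots budget → Pre_select_layers log_slots budget → Spec_select_layers log_slots budget (select_layers log_slots budget)

-- ===== LEMMAS AND PROOFS =====

-- the while-loop of A always lands on rows = budget - 1, rem = ls - (budget-1)*l,
-- provided ls > budget*l, 1 ≤ l and budget - 1 ≤ rows at entry.
theorem slWhile_lands (ls l b : Int) (hl : 1 ≤ l) (hgt : b * l < ls) :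
    ∀ (f : Nat) (rows rem dim : Int), b - 1 ≤ rows → rem = ls - rows * l →
      dim = rows + (if rem ≠ 0 then (1 : Int) else 0) → (rows - b + 2).toNat ≤ f →
      slWhile ls l b f rows rem dim = (b - 1, ls - (b - 1) * l) := by
  intro f
  induction f with
  | zero => intro rows rem dim hr _ _ hf; exfalso; omega
  | succ f ih =>
    intro rows rem dim hr hrem hdim hf
    by_cases hrow : rows = b - 1
    · have hne : rem ≠ 0 := by rw [hrem, hrow]; nlinarith
      have hdb : dim = b := by rw [hdim, if_pos hne]; omega
      simp only [slWhile]
      rw [if_neg (by omega : ¬ dim ≠ b), hrow, hrem, hrow]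
    · have hge : b ≤ rows := by omega
      have hdimne : dim ≠ b := by
        by_cases hz : rem = 0
        · rw [hdim, if_neg (by simpa using hz)]
          intro hEq
          have hrb : rows = b := by omega
          rw [hrem, hrb] at hz
          nlinarith
        · rw [hdim, if_pos hz]; omega
      simp only [slWhile]
      rw [if_pos hdimne]
      apply ih
      · omega
      · rfl
      · rfl
      · omega

theorem select_layers_eq_alt (ls b : Int) (hb : 0 < b) (hlb : b ≤ ls) :
    select_layers ls b = select_layers_alt ls b := by
  have hls : 0 < ls := lt_of_lt_of_le hb hlb
  simp only [select_layers, select_layers_alt]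
  have hLiff := (PySem.Int.neg_floordiv_neg_eq_iff_of_pos (a := ls) (b := b)
      (q := -(PySem.Int.floordiv (-ls) b)) hb).mp rfl
  set L := -(PySem.Int.floordiv (-ls) b) with hLdef
  obtain ⟨hL1, hL2⟩ := hLiff
  have hLpos : 0 < L := by nlinarith
  have hrowiff := (PySem.Int.floordiv_eq_iff_of_pos (a := ls) (b := L)
      (q := PySem.Int.floordiv ls L) hLpos).mp rfl
  have hsum := PySem.Int.floordiv_mul_add_mod ls L
  set rows := PySem.Int.floordiv ls L with hrowsdef
  obtain ⟨hr1, hr2⟩ := hrowiff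
  set rem := PySem.Int.mod ls L with hremdef
  by_cases hcase : rows + (if rem ≠ 0 then (1 : Int) else 0) < b
  · -- the correction branch of A; B takes its closed form
    rw [if_pos hcase, if_neg (not_le.mpr hcase)]
    have hL2' : 2 ≤ L := by
      by_contra hLe
      have hL1' : L = 1 := by omega
      rw [hL1'] at hr1 hr2 hsum
      simp only [mul_one] at hr1 hr2 hsum
      have hrem0 : rem = 0 := by omega
      rw [hrem0] at hcase
      simp at hcase
      omega
    have hgt : b * (L - 1) < ls := by nlinarith
    have hr0iff := (PySem.Int.floordiv_eq_iff_of_pos (a := ls) (b := L - 1)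
        (q := PySem.Int.floordiv ls (L - 1)) (by omega)).mp rfl
    set rows0 := PySem.Int.floordiv ls (L - 1) with hrows0def
    obtain ⟨hr01, hr02⟩ := hr0iff
    have hrows0ge : b ≤ rows0 := by
      rw [hrows0def]
      exact (PySem.Int.le_floordiv_iff_mul_le (by omega)).mpr (le_of_lt hgt)
    have hdim0gt : rows0 + (if ls - rows0 * (L - 1) ≠ 0 then (1 : Int) else 0) > b := by
      rcases lt_or_eq_of_le hrows0ge with h' | h'
      · split_ifs <;> omega
      · have hne : ls - rows0 * (L - 1) ≠ 0 := by rw [← h']; nlinarith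
        rw [if_pos hne]; omega
    rw [if_pos hdim0gt]
    have hland := slWhile_lands ls (L - 1) b (by omega) hgt (rows0.toNat + 1) rows0
      (ls - rows0 * (L - 1)) (rows0 + (if ls - rows0 * (L - 1) ≠ 0 then (1 : Int) else 0))
      (by omega) rfl rfl (by omega)
    rw [hland, if_neg (by nlinarith : ¬ ls = b * (L - 1))]
  · -- no correction: both sides return (L, rows, rem) directly
    rw [if_neg hcase, if_pos (not_lt.mp hcase)]

-- ===== VERDICT (by name: the statement is the Claim_ definition above) =====
theorem select_layers_spec : Claim_equal_select_layers := by
  intro ls b _ hpre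
  exact select_layers_eq_alt ls b hpre.1 hpre.2
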